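-- pv_equiv track=rewrite | github.com/Mehariwamlake/competitive-Programming | contest-20/aa.py | cardsGame
-- ===== SOURCE A (Python) =====
-- def cardsGame(card_amount, cards):
--     '''
--     Function that returns the total of Sereja and Dima
--     '''
--     sereja = 0
--     dima = 0
--     i = 0
--     j = card_amount - 1
--     turn = 0
--     result = []
--     while i <= j and turn <= card_amount:
--         if turn % 2 == 0:
--             if cards[i] < cards[j]:
--                 sereja += cards[j]
--                 j -= 1
--                 turn += 1
--             else:
--                 sereja += cards[i]
--                 i += 1
--                 turn += 1
--         else:
--             if cards[i] < cards[j]: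
--                 dima += cards[j]
--                 j -= 1
--                 turn += 1
--             else:
--                 dima += cards[i]
--                 i += 1
--                 turn += 1
--     return sereja, dima
-- ===== SOURCE B (Python) =====
-- def cardsGame(card_amount, cards):
--     # Phase 1: collect the picked cards in order, no turn bookkeeping.
--     picks = []
--     i, j = 0, card_amount - 1
--     while i <= j:
--         if cards[i] < cards[j]:
--             picks.append(cards[j])
--             j -= 1
--         else:
--             picks.append(cards[i])
--             i += 1
--     # Phase 2: fold the picks back-to-front, swapping roles each card.
--     me = other = 0
--     for c in reversed(picks):
--         me, other = c + other, me
--     return (me, other)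
-- ===== Notes on version B (the rewrite author's own statement) =====
-- stated objective: simpler
-- what changed: Splits A's fused loop into a pick-collection pass with no turn counter or parity branch, then a back-to-front swap fold that assigns picks to the two players without any parity arithmetic.
import Mathlib
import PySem

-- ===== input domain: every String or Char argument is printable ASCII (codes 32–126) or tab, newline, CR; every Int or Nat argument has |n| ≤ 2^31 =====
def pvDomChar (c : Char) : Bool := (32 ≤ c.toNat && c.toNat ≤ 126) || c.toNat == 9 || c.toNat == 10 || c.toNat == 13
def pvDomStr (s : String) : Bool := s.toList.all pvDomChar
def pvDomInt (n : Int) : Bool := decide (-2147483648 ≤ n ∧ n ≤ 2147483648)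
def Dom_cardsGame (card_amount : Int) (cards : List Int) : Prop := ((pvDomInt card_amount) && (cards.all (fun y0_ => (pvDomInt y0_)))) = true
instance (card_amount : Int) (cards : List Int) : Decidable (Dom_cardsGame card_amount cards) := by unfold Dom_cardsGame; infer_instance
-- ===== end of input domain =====

-- B splits A's fused parity loop into a pick-collection pass plus a back-to-front swap fold (objective: simpler).


-- ===== PORT A =====
-- A's while loop; cards[i]/cards[j] are ported with pyGet? (none = IndexError); `.getD 0` only
-- supplies a value outside Pre_cardsGame, where Python raises.
def cardsGameLoop (cards : List Int) (card_amount sereja dima i j turn : Int) : Int × Int :=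
  if _h : i ≤ j ∧ turn ≤ card_amount then
    let ci := (PySem.List.pyGet? cards i).getD 0
    let cj := (PySem.List.pyGet? cards j).getD 0
    if PySem.Int.mod turn 2 = 0 then
      if ci < cj then cardsGameLoop cards card_amount (sereja + cj) dima i (j - 1) (turn + 1)
      else cardsGameLoop cards card_amount (sereja + ci) dima (i + 1) j (turn + 1)
    else
      if ci < cj then cardsGameLoop cards card_amount sereja (dima + cj) i (j - 1) (turn + 1)
      else cardsGameLoop cards card_amount sereja (dima + ci) (i + 1) j (turn + 1)
  else (sereja, dima)
termination_by (j - i + 1).toNat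
decreasing_by all_goals omega

def cardsGame (card_amount : Int) (cards : List Int) : Int × Int :=
  cardsGameLoop cards card_amount 0 0 0 (card_amount - 1) 0

-- ===== PORT B =====
-- Phase 1 of Source B: the pick-collection while loop, picks appended to the accumulator.
def cardsGamePicks (cards : List Int) (i j : Int) (picks : List Int) : List Int :=
  if _h : i ≤ j then
    let ci := (PySem.List.pyGet? cards i).getD 0
    let cj := (PySem.List.pyGet? cards j).getD 0
    if ci < cj then cardsGamePicks cards i (j - 1) (picks ++ [cj])
    else cardsGamePicks cards (i + 1) j (picks ++ [ci])
  else picks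
termination_by (j - i + 1).toNat
decreasing_by all_goals omega

def cardsGame_alt (card_amount : Int) (cards : List Int) : Int × Int :=
  let picks := cardsGamePicks cards 0 (card_amount - 1) []
  -- Phase 2 of Source B: for c in reversed(picks): me, other = c + other, me
  picks.reverse.foldl (fun mo c => (c + mo.2, mo.1)) (0, 0)

-- ===== PRECONDITION & SPEC =====
-- Pre_ excludes exactly card_amount > len(cards), where both A and B raise IndexError on cards[j].
def Pre_cardsGame (card_amount : Int) (cards : List Int) : Prop :=
  card_amount ≤ (cards.length : Int)
instance (card_amount : Int) (cards : List Int) : Decidable (Pre_cardsGame card_amount cards) := by unfold Pre_cardsGame; infer_instance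

def pvWitness_cardsGame : Int × List Int := (4, [4, 1, 2, 10])

def Spec_cardsGame (card_amount : Int) (cards : List Int) (out : Int × Int) : Prop := out = cardsGame_alt card_amount cards
instance (card_amount : Int) (cards : List Int) (out : Int × Int) : Decidable (Spec_cardsGame card_amount cards out) := by unfold Spec_cardsGame; infer_instance

-- ===== CLAIM (what is proved, stated in full; the proofs are below) =====
def Claim_equal_cardsGame : Prop := ∀ (card_amount : Int) (cards : List Int), Dom_cardsGame card_amount cards → Pre_cardsGame card_amount cards → Spec_cardsGame card_amount cards (cardsGame card_amount cards)

-- ===== LEMMAS AND PROOFS =====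

-- The picks loop is the accumulator plus the picks gathered from scratch.
theorem cardsGamePicks_acc (cards : List Int) (i j : Int) (picks : List Int) :
    cardsGamePicks cards i j picks = picks ++ cardsGamePicks cards i j [] := by
  rw [cardsGamePicks, cardsGamePicks]
  by_cases h : i ≤ j
  · simp only [h, dif_pos]
    by_cases hlt : (PySem.List.pyGet? cards i).getD 0 < (PySem.List.pyGet? cards j).getD 0
    · simp only [hlt, if_pos]
      rw [cardsGamePicks_acc cards i (j - 1) (picks ++ [_]),
        cardsGamePicks_acc cards i (j - 1) ([] ++ [_])]
      simp
    · simp only [hlt, if_neg, not_false_iff]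
      rw [cardsGamePicks_acc cards (i + 1) j (picks ++ [_]),
        cardsGamePicks_acc cards (i + 1) j ([] ++ [_])]
      simp
  · simp [h]
termination_by (j - i + 1).toNat
decreasing_by all_goals omega

-- B's phase-2 fold, as a function of the picks list.
def swapFold (p : List Int) : Int × Int :=
  p.reverse.foldl (fun mo c => (c + mo.2, mo.1)) (0, 0)

theorem swapFold_cons (c : Int) (p : List Int) :
    swapFold (c :: p) = (c + (swapFold p).2, (swapFold p).1) := by
  simp [swapFold, List.foldl_append]

-- Main invariant: A's loop equals the swap fold of B's picks, routed by the parity of `turn`,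
-- as long as the turn bound cannot fire (turn + (j - i) ≤ card_amount).
theorem loop_eq_fold (cards : List Int) (card_amount : Int) :
    ∀ (sereja dima i j turn : Int), turn + (j - i) ≤ card_amount →
      cardsGameLoop cards card_amount sereja dima i j turn =
        (let mo := swapFold (cardsGamePicks cards i j []);
         if PySem.Int.mod turn 2 = 0 then (sereja + mo.1, dima + mo.2)
         else (sereja + mo.2, dima + mo.1)) := by
  intro sereja dima i j turn hbound
  by_cases hij : i ≤ j
  · have hturn : turn ≤ card_amount := by omega
    rw [cardsGameLoop]
    rw [cardsGamePicks]
    simp only [hij, hturn, and_self, dif_pos]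
    set ci := (PySem.List.pyGet? cards i).getD 0 with hci
    set cj := (PySem.List.pyGet? cards j).getD 0 with hcj
    have hmod : PySem.Int.mod turn 2 = turn % 2 := PySem.Int.mod_eq_emod_of_pos (by omega)
    have hmod' : PySem.Int.mod (turn + 1) 2 = (turn + 1) % 2 := PySem.Int.mod_eq_emod_of_pos (by omega)
    by_cases hlt : ci < cj
    · simp only [if_pos hlt]
      rw [loop_eq_fold cards card_amount _ _ i (j - 1) (turn + 1) (by omega),
        loop_eq_fold cards card_amount _ _ i (j - 1) (turn + 1) (by omega)]
      rw [show ([] : List Int) ++ [cj] = [cj] from rfl, cardsGamePicks_acc cards i (j - 1) [cj]]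
      simp only [List.singleton_append, swapFold_cons, hmod, hmod']
      by_cases hpar : turn % 2 = 0
      · have : (turn + 1) % 2 = 1 := by omega
        simp [hpar, this, add_assoc]
      · have : (turn + 1) % 2 = 0 := by omega
        simp [hpar, this, add_assoc]
    · simp only [if_neg hlt]
      rw [loop_eq_fold cards card_amount _ _ (i + 1) j (turn + 1) (by omega),
        loop_eq_fold cards card_amount _ _ (i + 1) j (turn + 1) (by omega)]
      rw [show ([] : List Int) ++ [ci] = [ci] from rfl, cardsGamePicks_acc cards (i + 1) j [ci]]
      simp only [List.singleton_append, swapFold_cons, hmod, hmod']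
      by_cases hpar : turn % 2 = 0
      · have : (turn + 1) % 2 = 1 := by omega
        simp [hpar, this, add_assoc]
      · have : (turn + 1) % 2 = 0 := by omega
        simp [hpar, this, add_assoc]
  · rw [cardsGameLoop, cardsGamePicks]
    simp [hij, swapFold]
termination_by _ _ i j _ _ => (j - i + 1).toNat
decreasing_by all_goals omega

-- ===== VERDICT (by name: the statement is the Claim_ definition above) =====
theorem cardsGame_spec : Claim_equal_cardsGame := by
  intro card_amount cards _hdom _hpre
  unfold Spec_cardsGame cardsGame cardsGame_alt
  rw [loop_eq_fold cards card_amount 0 0 0 (card_amount - 1) 0 (by omega)]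
  simp [swapFold, PySem.Int.mod]
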